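-- pv_equiv track=rewrite | github.com/teddyy279/Python | Hàm/Problem18 Bình phương số nguyên tố 1.py | solve
-- ===== SOURCE A (Python) =====
-- from math import isqrt
--
-- def solve(n):
--     for i in range(2, isqrt(n) + 1):
--         if n % i == 0:
--             mu = 0
--             while n % i == 0:
--                 mu += 1
--                 n //= i  # Corrected this line
--             if mu >= 2:
--                 return True
--     return False
-- ===== SOURCE B (Python) =====
-- from math import isqrt
--
-- def solve(n):
--     return any(n % (i * i) == 0 for i in range(2, isqrt(n) + 1))
-- ===== Notes on version B (the rewrite author's own statement) =====
-- stated objective: simpler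
-- what changed: Replaced the factor-extraction loop (inner while dividing n out by each factor and counting multiplicity) by a single square-divisibility test n % (i*i) == 0 per candidate i, with no mutation of n and no inner loop.
import Mathlib
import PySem

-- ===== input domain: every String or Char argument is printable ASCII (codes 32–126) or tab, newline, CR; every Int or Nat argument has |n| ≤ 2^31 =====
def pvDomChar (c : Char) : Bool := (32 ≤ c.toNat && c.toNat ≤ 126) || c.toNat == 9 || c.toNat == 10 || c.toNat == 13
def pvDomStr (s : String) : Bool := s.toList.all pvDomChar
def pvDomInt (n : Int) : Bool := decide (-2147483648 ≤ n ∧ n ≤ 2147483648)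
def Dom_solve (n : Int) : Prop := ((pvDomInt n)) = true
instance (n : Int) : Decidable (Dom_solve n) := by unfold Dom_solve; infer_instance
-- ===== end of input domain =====

-- B replaces A's factor extraction (inner while loop dividing n out by each factor and counting
-- its multiplicity) by one square-divisibility test n % (i*i) == 0 per candidate, without
-- mutating n — objective: simpler.

-- ===== PORT A =====
-- math.isqrt, exact for n ≥ 0 (Python raises ValueError for n < 0; Pre_solve excludes those)
def isqrtInt (n : Int) : Int := (Nat.sqrt n.toNat : Int)

-- inner 'while n % i == 0: mu += 1; n //= i'; the extra guards 2 ≤ i and 0 < n only make the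
-- recursion total (they always hold at A's call sites) — returns the final (n, mu)
def solveWhile (i : Int) (n : Int) (mu : Int) : Int × Int :=
  if h : PySem.Int.mod n i = 0 ∧ 2 ≤ i ∧ 0 < n then
    solveWhile i (PySem.Int.floordiv n i) (mu + 1)
  else (n, mu)
termination_by n.toNat
decreasing_by
  rcases h with ⟨hm, hi, hn⟩
  rw [PySem.Int.floordiv_eq_ediv_of_pos (by omega)]
  have h2 : 0 ≤ n / i := Int.ediv_nonneg (by omega) (by omega)
  have h4 : 0 ≤ n % i := Int.emod_nonneg n (by omega)
  have h5 : i * (n / i) + n % i = n := Int.mul_ediv_add_emod n i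
  have h1 : n / i < n := by
    by_contra hcon
    have h3 : 2 * (n / i) ≤ i * (n / i) := mul_le_mul_of_nonneg_right (by omega) h2
    omega
  omega

-- A's for-loop over range(2, isqrt(n)+1) with its early 'return True'
def solveLoop : List Int → Int → Bool
  | [], _ => false
  | i :: rest, n =>
    if PySem.Int.mod n i = 0 then
      let p := solveWhile i n 0
      if 2 ≤ p.2 then true else solveLoop rest p.1
    else solveLoop rest n

def solve (n : Int) : Bool :=
  solveLoop (PySem.List.pyRange 2 (isqrtInt n + 1) 1) n

-- ===== PORT B =====
def solve_alt (n : Int) : Bool :=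
  (PySem.List.pyRange 2 (isqrtInt n + 1) 1).any (fun i => PySem.Int.mod n (i * i) == 0)

-- ===== PRECONDITION & SPEC =====
-- Pre_ excludes n < 0, where Python's math.isqrt raises ValueError (in A and in B alike).
def Pre_solve (n : Int) : Prop := 0 ≤ n
instance (n : Int) : Decidable (Pre_solve n) := by unfold Pre_solve; infer_instance
def pvWitness_solve : Int := (12)

def Spec_solve (n : Int) (out : Bool) : Prop := out = solve_alt n
instance (n : Int) (out : Bool) : Decidable (Spec_solve n out) := by unfold Spec_solve; infer_instance

-- ===== CLAIM (what is proved, stated in full; the proofs are below) =====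
def Claim_equal_solve : Prop := ∀ (n : Int), Dom_solve n → Pre_solve n → Spec_solve n (solve n)

-- ===== LEMMAS AND PROOFS =====

-- the while loop factors i out completely: result (n', mu + k) with n = i^k * n', i ∤ n'
theorem solveWhile_spec (i : Int) (hi : 2 ≤ i) :
    ∀ (N : Nat) (n : Int), n.toNat ≤ N → 0 < n → ∀ mu : Int,
      ∃ (k : Nat) (n' : Int), solveWhile i n mu = (n', mu + k) ∧ n = i ^ k * n' ∧ ¬ i ∣ n' ∧ 0 < n' := by
  intro N
  induction N with
  | zero => intro n hN hn mu; omega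
  | succ N ih =>
    intro n hN hn mu
    rw [solveWhile]
    by_cases hm : PySem.Int.mod n i = 0
    · have hdvd : i ∣ n := (PySem.Int.mod_eq_zero_iff_dvd n i).mp hm
      rw [dif_pos ⟨hm, hi, hn⟩]
      obtain ⟨q, hq⟩ := hdvd
      have hfd : PySem.Int.floordiv n i = q := by
        rw [PySem.Int.floordiv_eq_ediv_of_pos (by omega), hq]
        exact Int.mul_ediv_cancel_left q (by omega)
      have hqpos : 0 < q := by nlinarith
      have hqlt : q < n := by nlinarith
      obtain ⟨k, n', heq, hfact, hnd, hn'⟩ := ih q (by omega) hqpos (mu + 1)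
      refine ⟨k + 1, n', ?_, ?_, hnd, hn'⟩
      · rw [hfd, heq]
        congr 1
        push_cast
        ring
      · rw [hq, hfact]
        ring
    · rw [dif_neg (by simp [hm])]
      refine ⟨0, n, by simp, by simp, ?_, hn⟩
      intro hd
      exact hm ((PySem.Int.mod_eq_zero_iff_dvd n i).mpr hd)

-- forward: if A's loop returns true, some list element's square divides the original n₀
theorem solveLoop_true_imp (n₀ : Int) :
    ∀ (l : List Int) (n : Int), 0 < n → n ∣ n₀ → (∀ i ∈ l, 2 ≤ i) →
      solveLoop l n = true → ∃ i ∈ l, i ^ 2 ∣ n₀ := by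
  intro l
  induction l with
  | nil => intro n _ _ _ h; simp [solveLoop] at h
  | cons i rest ih =>
    intro n hn hdvd hall h
    have hi : 2 ≤ i := hall i (by simp)
    rw [solveLoop] at h
    by_cases hm : PySem.Int.mod n i = 0
    · rw [if_pos hm] at h
      obtain ⟨k, n', heq, hfact, hnd, hn'⟩ := solveWhile_spec i hi n.toNat n le_rfl hn 0
      simp only [heq] at h
      by_cases hk : (2 : Int) ≤ 0 + (k : Int)
      · refine ⟨i, by simp, ?_⟩
        have : i ^ 2 ∣ i ^ k := pow_dvd_pow i (by exact_mod_cast by omega)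
        exact dvd_trans (dvd_trans this ⟨n', hfact⟩) hdvd
      · rw [if_neg hk] at h
        obtain ⟨j, hj, hjd⟩ := ih n' hn' (dvd_trans ⟨i ^ k, by rw [hfact]; ring⟩ hdvd)
          (fun x hx => hall x (by simp [hx])) h
        exact ⟨j, by simp [hj], hjd⟩
    · rw [if_neg hm] at h
      obtain ⟨j, hj, hjd⟩ := ih n hn hdvd (fun x hx => hall x (by simp [hx])) h
      exact ⟨j, by simp [hj], hjd⟩

-- backward: a prime p with p² ∣ n lying in the remaining range forces A's loop to return true
theorem solveLoop_true_of_prime (b : Int) (p : Int) (hp : Prime p) :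
    ∀ (K : Nat) (a n : Int), (b - a).toNat ≤ K → 2 ≤ a → a ≤ p → p < b → p ^ 2 ∣ n → 0 < n →
      solveLoop (PySem.List.pyRange a b 1) n = true := by
  intro K
  induction K with
  | zero => intro a n hK ha hap hpb _ _; omega
  | succ K ih =>
    intro a n hK ha hap hpb hsq hn
    have hab : a < b := by omega
    rw [PySem.List.pyRange_one_cons hab, solveLoop]
    have hppos : 0 < p := by omega
    by_cases hm : PySem.Int.mod n a = 0
    · rw [if_pos hm]
      obtain ⟨k, n', heq, hfact, hnd, hn'⟩ := solveWhile_spec a ha n.toNat n le_rfl hn 0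
      simp only [heq]
      by_cases hk : (2 : Int) ≤ 0 + (k : Int)
      · rw [if_pos hk]
      · rw [if_neg hk]
        -- k ≤ 1; and a ∣ n so k ≥ 1, hence k = 1 and n = a * n'
        have hadvd : a ∣ n := (PySem.Int.mod_eq_zero_iff_dvd n a).mp hm
        have hk1 : k = 1 := by
          rcases Nat.lt_or_ge k 1 with h1 | h1
          · interval_cases k
            · simp at hfact; subst hfact; exact (hnd hadvd).elim
          · omega
        subst hk1
        rw [pow_one] at hfact
        have hanep : a ≠ p := by
          intro he; subst he
          have : a ∣ n' := by
            have h2 : a * a ∣ a * n' := by rw [← hfact, ← pow_two]; exact hsq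
            exact (mul_dvd_mul_iff_left (by omega : a ≠ 0)).mp h2
          exact hnd this
        have hap' : a < p := by omega
        have hpnda : ¬ p ∣ a := fun hd => by have := Int.le_of_dvd (by omega) hd; omega
        -- p² ∣ a * n' with p prime, p ∤ a ⇒ p² ∣ n'
        have hpn' : p ^ 2 ∣ n' := by
          have h1 : p ∣ a * n' := dvd_trans (dvd_pow_self p (by norm_num)) (hfact ▸ hsq)
          rcases hp.dvd_mul.mp h1 with h | h
          · exact absurd h hpnda
          · obtain ⟨t, ht⟩ := h
            have h2 : p * p ∣ a * (p * t) := by rw [← ht, ← pow_two]; exact hfact ▸ hsq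
            have h3 : p ∣ a * t := by
              have h4 : p * (a * t) = a * (p * t) := by ring
              obtain ⟨u, hu⟩ := h2
              refine ⟨u, ?_⟩
              apply mul_left_cancel₀ (show p ≠ 0 by omega)
              rw [h4, hu]; ring
            rcases hp.dvd_mul.mp h3 with h | h
            · exact absurd h hpnda
            · obtain ⟨v, hv⟩ := h
              exact ⟨v, by rw [ht, hv, pow_two]; ring⟩
        exact ih (a + 1) n' (by omega) (by omega) (by omega) hpb hpn' hn'
    · rw [if_neg hm]
      have hanep : a ≠ p := by
        intro he; subst he
        exact hm ((PySem.Int.mod_eq_zero_iff_dvd n a).mpr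
          (dvd_trans (dvd_pow_self a (by norm_num)) hsq))
      exact ih (a + 1) n (by omega) (by omega) (by omega) hpb hsq hn

theorem solve_alt_true_iff (n : Int) :
    solve_alt n = true ↔ ∃ i : Int, 2 ≤ i ∧ i < isqrtInt n + 1 ∧ i ^ 2 ∣ n := by
  unfold solve_alt
  rw [List.any_eq_true]
  constructor
  · rintro ⟨i, hi, hmod⟩
    obtain ⟨h1, h2⟩ := PySem.List.mem_pyRange_one.mp hi
    refine ⟨i, h1, h2, ?_⟩
    rw [pow_two]
    exact (PySem.Int.mod_eq_zero_iff_dvd n (i * i)).mp (by simpa using hmod)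
  · rintro ⟨i, h1, h2, hd⟩
    refine ⟨i, PySem.List.mem_pyRange_one.mpr ⟨h1, h2⟩, ?_⟩
    simp only [beq_iff_eq]
    exact (PySem.Int.mod_eq_zero_iff_dvd n (i * i)).mpr (by rwa [pow_two] at hd)

-- ===== VERDICT (by name: the statement is the Claim_ definition above) =====
theorem solve_spec : Claim_equal_solve := by
  intro n _ hpre
  unfold Spec_solve
  by_cases hr : isqrtInt n + 1 ≤ 2
  · unfold solve solve_alt
    rw [PySem.List.pyRange_one_eq_nil hr]
    rfl
  · have hm : 2 ≤ isqrtInt n := by omega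
    have hs2 : 2 ≤ Nat.sqrt n.toNat := by unfold isqrtInt at hm; exact_mod_cast hm
    have hn4 : 4 ≤ n.toNat := by
      have := Nat.sqrt_le_self n.toNat
      nlinarith [Nat.sqrt_le' n.toNat, Nat.le_sqrt.mp hs2]
    have hn : 0 < n := by omega
    rw [Bool.eq_iff_iff]
    constructor
    · intro h
      obtain ⟨i, hi, hd⟩ := solveLoop_true_imp n (PySem.List.pyRange 2 (isqrtInt n + 1) 1) n hn
        dvd_rfl (fun i hi => (PySem.List.mem_pyRange_one.mp hi).1) h
      obtain ⟨h1, h2⟩ := PySem.List.mem_pyRange_one.mp hi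
      exact (solve_alt_true_iff n).mpr ⟨i, h1, h2, hd⟩
    · intro h
      obtain ⟨i, h1, h2, hd⟩ := (solve_alt_true_iff n).mp h
      set q := i.toNat with hq
      have hiq : (q : Int) = i := by omega
      have hq2 : 2 ≤ q := by omega
      have hp : (q.minFac).Prime := Nat.minFac_prime (by omega)
      have hple : q.minFac ≤ q := Nat.minFac_le (by omega)
      have hpd : ((q.minFac : Int)) ∣ i := by
        rw [← hiq]; exact_mod_cast Nat.minFac_dvd q
      have hp2 : 2 ≤ q.minFac := hp.two_le
      have hpsq : ((q.minFac : Int)) ^ 2 ∣ n := dvd_trans (pow_dvd_pow_of_dvd hpd 2) hd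
      have hprime : Prime ((q.minFac : Int)) := Nat.prime_iff_prime_int.mp hp
      exact solveLoop_true_of_prime (isqrtInt n + 1) (q.minFac) hprime
        ((isqrtInt n + 1) - 2).toNat 2 n le_rfl (by omega) (by omega) (by omega) hpsq hn
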